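-- pv_equiv track=rewrite | github.com/ksu-cs-cc/ksu-cs-cc.github.io | content/4-cc315/z-instructor-resources/mod1_compare.py | appender
-- ===== SOURCE A (Python) =====
-- def appender(num, base):
--     result = ""
--     for i in range(num):
--         result = result + base
--         if i%2 == 0:
--             result = result + " "
--         else:
--             result = result + ", "
--     return result
-- ===== SOURCE B (Python) =====
-- def appender(num, base):
--     if num <= 0:
--         return ""
--     unit = base + " " + base + ", "
--     return unit * (num // 2) + (base + " " if num % 2 else "")
-- ===== Notes on version B (the rewrite author's own statement) =====
-- stated objective: alternative
-- what changed: Replaces the per-index accumulation loop (appending base plus a parity-chosen separator each iteration) with a closed-form construction: the two-element unit 'base + " " + base + ", "' repeated num//2 times, plus a trailing 'base + " "' iff num is odd.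
import Mathlib
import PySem

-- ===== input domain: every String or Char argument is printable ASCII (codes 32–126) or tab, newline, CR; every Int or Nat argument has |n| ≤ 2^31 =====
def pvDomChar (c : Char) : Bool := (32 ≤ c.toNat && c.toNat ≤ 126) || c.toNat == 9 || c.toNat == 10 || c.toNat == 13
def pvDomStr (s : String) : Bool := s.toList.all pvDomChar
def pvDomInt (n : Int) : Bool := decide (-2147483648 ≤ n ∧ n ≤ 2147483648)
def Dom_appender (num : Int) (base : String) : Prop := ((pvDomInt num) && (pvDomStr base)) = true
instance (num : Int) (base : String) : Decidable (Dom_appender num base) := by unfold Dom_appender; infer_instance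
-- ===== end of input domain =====

-- B replaces A's per-index loop by a closed form: unit = base+" "+base+", " repeated num//2 times,
-- plus base+" " iff num is odd ("alternative": same asymptotic work, no per-element loop).
-- Strings are handled as List Char internally (PySem convention) and wrapped with String.ofList.

-- ===== PORT A =====
def appender (num : Int) (base : String) : String :=
  String.ofList ((PySem.List.pyRange 0 num 1).foldl
    (fun result i =>
      (result ++ base.toList) ++ (if PySem.Int.mod i 2 == 0 then [' '] else [',', ' '])) [])

-- ===== PORT B =====
-- Source B's 'unit * k' (string repetition)
def strRepeat (u : List Char) : Nat → List Char
  | 0 => []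
  | k + 1 => strRepeat u k ++ u

def appender_alt (num : Int) (base : String) : String :=
  if num ≤ 0 then ""
  else
    let bl := base.toList
    let unit := bl ++ [' '] ++ bl ++ [',', ' ']
    String.ofList (strRepeat unit (PySem.Int.floordiv num 2).toNat ++
      (if PySem.Int.mod num 2 == 0 then [] else bl ++ [' ']))

-- ===== PRECONDITION & SPEC =====
def Spec_appender (num : Int) (base : String) (out : String) : Prop := out = appender_alt num base
instance (num : Int) (base : String) (out : String) : Decidable (Spec_appender num base out) := by unfold Spec_appender; infer_instance

-- ===== CLAIM (what is proved, stated in full; the proofs are below) =====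
def Claim_equal_appender : Prop := ∀ (num : Int) (base : String), Dom_appender num base → Spec_appender num base (appender num base)

-- ===== LEMMAS AND PROOFS =====

-- The loop of A over range(n) computes exactly B's closed form.
theorem loop_closed (bl : List Char) : ∀ n : Nat,
    (List.range n).foldl
      (fun r k => (r ++ bl) ++ (if k % 2 == 0 then [' '] else [',', ' '])) []
    = strRepeat (bl ++ [' '] ++ bl ++ [',', ' ']) (n / 2) ++
        (if n % 2 == 0 then [] else bl ++ [' ']) := by
  intro n
  induction n with
  | zero => simp [strRepeat]
  | succ n ih =>
    rw [List.range_succ, List.foldl_append, ih]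
    rcases Nat.even_or_odd n with h | h
    · have h2 : n % 2 = 0 := Nat.even_iff.mp h
      have hd : (n + 1) / 2 = n / 2 := by omega
      have h2' : (n + 1) % 2 = 1 := by omega
      simp [h2, h2', hd]
    · have h2 : n % 2 = 1 := Nat.odd_iff.mp h
      have hd : (n + 1) / 2 = n / 2 + 1 := by omega
      have h2' : (n + 1) % 2 = 0 := by omega
      simp [h2, h2', hd, strRepeat, List.append_assoc]

theorem appender_spec : Claim_equal_appender := by
  intro num base _
  unfold Spec_appender appender appender_alt
  by_cases hle : num ≤ 0
  · rw [PySem.List.pyRange_one_eq_nil hle]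
    simp [hle]
  · have hpos : 0 < num := by omega
    obtain ⟨n, rfl⟩ : ∃ n : Nat, num = (n : Int) := ⟨num.toNat, by omega⟩
    rw [PySem.List.pyRange_one]
    simp only [List.foldl_map]
    have hN : ((n : Int) - 0).toNat = n := by omega
    rw [hN]
    have hmod : ∀ k : Nat, (PySem.Int.mod ((0 : Int) + (k : Int)) 2 == 0)
        = ((k % 2 == 0 : Bool)) := by
      intro k
      rw [zero_add, PySem.Int.mod_eq_emod_of_pos (by omega : (0 : Int) < 2)]
      by_cases h : k % 2 = 0
      · have h' : ((k : Int)) % 2 = 0 := by omega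
        simp [h, h']
      · have h1 : k % 2 = 1 := by omega
        have h' : ((k : Int)) % 2 = 1 := by omega
        simp [h1, h']
    rw [List.foldl_ext _ _ [] (fun r k _ => by rw [hmod]), loop_closed]
    rw [PySem.Int.floordiv_eq_ediv_of_pos (by omega : (0 : Int) < 2),
        PySem.Int.mod_eq_emod_of_pos (by omega : (0 : Int) < 2)]
    have hn0 : n ≠ 0 := by omega
    have ht : ((n : Int) / 2).toNat = n / 2 := by omega
    have hdvd : ((n : Int)) % 2 = 0 ↔ n % 2 = 0 := by omega
    simp [hn0, ht, hdvd]
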